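-- pv_equiv track=rewrite | github.com/khunseop/firewall-analysis-tool | bak_firewall_module/mf2/mf2_module.py | extract_braces_of_depth_2_or_more_without_outer_braces
-- ===== SOURCE A (Python) =====
-- def extract_braces_of_depth_2_or_more_without_outer_braces(content: str) -> list:
--     """
--     중괄호 블록 중 깊이가 2 이상인 부분만 추출하여 외부 중괄호는 제거한 내용을 리스트로 반환합니다.
--     """
--     depth = 0
--     results = []
--     temp = ""
--     for char in content:
--         if char == '{':
--             if depth >= 1:
--                 temp += char
--             depth += 1
--         elif char == '}':
--             depth -= 1
--             if depth >= 1: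
--                 temp += char
--                 if depth == 1:
--                     results.append(temp[1:-1].strip())
--                     temp = ""
--         elif depth >= 2:
--             temp += char
--     return results
-- ===== SOURCE B (Python) =====
-- def extract_braces_of_depth_2_or_more_without_outer_braces(content: str) -> list:
--     # One pass collecting (start, end) index pairs of depth-2 brace spans,
--     # then a slicing pass over the original string.
--     depth = 0
--     start = -1
--     spans = []
--     for i, ch in enumerate(content):
--         if ch == '{':
--             depth += 1
--             if depth == 2:
--                 start = i
--         elif ch == '}':
--             depth -= 1
--             if depth == 1:
--                 spans.append((start, i))
--     return [content[s + 1:e].strip() for s, e in spans]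
-- ===== Notes on version B (the rewrite author's own statement) =====
-- stated objective: alternative
-- what changed: Instead of accumulating each depth-2 block's text character by character into a temp string, B records only (start,end) index pairs at the depth 1->2 and 2->1 transitions in one pass and produces the results by slicing the original string once per block.
import Mathlib
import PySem

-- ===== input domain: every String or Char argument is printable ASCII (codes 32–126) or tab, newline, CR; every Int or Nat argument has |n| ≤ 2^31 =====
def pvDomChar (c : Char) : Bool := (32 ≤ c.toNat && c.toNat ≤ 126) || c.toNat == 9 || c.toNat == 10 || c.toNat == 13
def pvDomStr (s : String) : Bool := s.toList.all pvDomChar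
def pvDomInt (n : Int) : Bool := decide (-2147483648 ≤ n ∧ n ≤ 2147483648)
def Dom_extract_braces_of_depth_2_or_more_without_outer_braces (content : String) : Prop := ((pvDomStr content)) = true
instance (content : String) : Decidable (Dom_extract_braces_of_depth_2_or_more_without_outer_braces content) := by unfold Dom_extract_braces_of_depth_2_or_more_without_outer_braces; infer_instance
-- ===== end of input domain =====

-- B replaces A's per-character temp-string accumulation by collecting (start,end)
-- index pairs in one pass and slicing the input once per block (objective: alternative).

-- ===== PORT A =====
-- state: (depth, results, temp)
def pvStepA (s : Int × List String × List Char) (c : Char) : Int × List String × List Char :=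
  if c = '{' then
    (s.1 + 1, s.2.1, if 1 ≤ s.1 then s.2.2 ++ [c] else s.2.2)
  else if c = '}' then
    if 1 ≤ s.1 - 1 then
      if s.1 - 1 = 1 then
        (s.1 - 1,
         s.2.1 ++ [String.ofList (PySem.Chars.strip
           (PySem.List.slice (s.2.2 ++ [c]) (some 1) (some (-1))))], [])
      else (s.1 - 1, s.2.1, s.2.2 ++ [c])
    else (s.1 - 1, s.2.1, s.2.2)
  else if 2 ≤ s.1 then (s.1, s.2.1, s.2.2 ++ [c]) else (s.1, s.2.1, s.2.2)

def extract_braces_of_depth_2_or_more_without_outer_braces (content : String) : List String :=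
  (content.toList.foldl pvStepA (0, [], [])).2.1

-- ===== PORT B =====
-- state: (depth, start, spans)
def pvStepB (s : Int × Int × List (Int × Int)) (p : Int × Char) : Int × Int × List (Int × Int) :=
  if p.2 = '{' then
    (s.1 + 1, if s.1 + 1 = 2 then p.1 else s.2.1, s.2.2)
  else if p.2 = '}' then
    (s.1 - 1, s.2.1, if s.1 - 1 = 1 then s.2.2 ++ [(s.2.1, p.1)] else s.2.2)
  else s

def pvSliceStrip (cs : List Char) (se : Int × Int) : String :=
  String.ofList (PySem.Chars.strip (PySem.List.slice cs (some (se.1 + 1)) (some se.2)))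

def extract_braces_of_depth_2_or_more_without_outer_braces_alt (content : String) : List String :=
  (((PySem.List.enumerate content.toList 0).foldl pvStepB (0, -1, [])).2.2).map
    (pvSliceStrip content.toList)

-- ===== PRECONDITION & SPEC =====
def Spec_extract_braces_of_depth_2_or_more_without_outer_braces (content : String) (out : List String) : Prop := out = extract_braces_of_depth_2_or_more_without_outer_braces_alt content
instance (content : String) (out : List String) : Decidable (Spec_extract_braces_of_depth_2_or_more_without_outer_braces content out) := by unfold Spec_extract_braces_of_depth_2_or_more_without_outer_braces; infer_instance

-- ===== CLAIM (what is proved, stated in full; the proofs are below) =====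
def Claim_equal_extract_braces_of_depth_2_or_more_without_outer_braces : Prop := ∀ (content : String), Dom_extract_braces_of_depth_2_or_more_without_outer_braces content → Spec_extract_braces_of_depth_2_or_more_without_outer_braces content (extract_braces_of_depth_2_or_more_without_outer_braces content)

-- ===== LEMMAS AND PROOFS =====

-- temp[1:-1] strips the first and last character: A's flushed block body.
lemma slice_one_negone (t : List Char) (c : Char) :
    PySem.List.slice (t ++ [c]) (some 1) (some (-1)) = t.drop 1 := by
  cases t with
  | nil => simp [PySem.List.slice]
  | cons x t' =>
    simp [PySem.List.slice, PySem.List.clampIdx]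
    have h : (if ((t'.length : Int) + 1) < 0 then 0 else t'.length + 1) = t'.length + 1 :=
      if_neg (by omega)
    rw [h, Nat.add_sub_cancel]
    exact List.take_left (l₁ := t') (l₂ := [c])

-- the slice content[s+1:e] of the full string equals the chars A accumulated
lemma slice_of_prefix (pre rest : List Char) (s : Nat) (h : s < pre.length) :
    PySem.List.slice (pre ++ rest) (some ((s : Int) + 1)) (some (pre.length : Int))
      = pre.drop (s + 1) := by
  have h1 : ((s : Int) + 1) = ((s + 1 : Nat) : Int) := by push_cast; ring
  rw [h1, PySem.List.slice_natCast, List.drop_append_of_le_length (by omega)]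
  have := List.take_left (l₁ := pre.drop (s + 1)) (l₂ := rest)
  rwa [List.length_drop] at this

-- main loop invariant: A's fold and B's fold stay in lockstep
lemma loop_eq (cs : List Char) :
    ∀ (rest pre : List Char) (d : Int) (res : List String) (temp : List Char)
      (start : Int) (spans : List (Int × Int)),
    cs = pre ++ rest →
    res = spans.map (pvSliceStrip cs) →
    (d ≤ 1 → temp = []) →
    (2 ≤ d → ∃ s : Nat, start = (s : Int) ∧ s < pre.length ∧ temp = pre.drop s) →
    (rest.foldl pvStepA (d, res, temp)).2.1
      = ((PySem.List.enumerate rest (pre.length : Int)).foldl pvStepB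
          (d, start, spans)).2.2.map (pvSliceStrip cs) := by
  intro rest
  induction rest with
  | nil =>
    intro pre d res temp start spans _ hres _ _
    simpa [PySem.List.enumerate_nil] using hres
  | cons c rest ih =>
    intro pre d res temp start spans hcs hres htemp1 htemp2
    rw [PySem.List.enumerate_cons, List.foldl_cons, List.foldl_cons]
    have hpre' : cs = (pre ++ [c]) ++ rest := by simpa using hcs
    have hlen' : ((pre ++ [c]).length : Int) = (pre.length : Int) + 1 := by
      simp [List.length_append]
    by_cases hc1 : c = '{'
    · -- opening brace
      by_cases hd2 : 2 ≤ d
      · -- already inside a block: append to temp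
        obtain ⟨s, hs, hslt, htemp⟩ := htemp2 hd2
        have hA : pvStepA (d, res, temp) c = (d + 1, res, temp ++ [c]) := by
          simp [pvStepA, hc1, show (1:Int) ≤ d by omega]
        have hB : pvStepB (d, start, spans) ((pre.length : Int), c)
            = (d + 1, start, spans) := by
          simp [pvStepB, hc1, show ¬(d + 1 = 2) by omega]
        rw [hA, hB, ← hlen']
        exact ih (pre ++ [c]) (d + 1) res (temp ++ [c]) start spans hpre' hres
          (by omega)
          (fun _ => ⟨s, hs, by simp [List.length_append]; omega,
            by rw [htemp, List.drop_append_of_le_length (by omega)]⟩)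
      · by_cases hd1 : d = 1
        · -- depth 1 → 2 transition: block starts here
          have hA : pvStepA (d, res, temp) c = (d + 1, res, temp ++ [c]) := by
            simp [pvStepA, hc1, show (1:Int) ≤ d by omega]
          have hB : pvStepB (d, start, spans) ((pre.length : Int), c)
              = (d + 1, (pre.length : Int), spans) := by
            simp [pvStepB, hc1, show d + 1 = 2 by omega]
          rw [hA, hB, ← hlen']
          have ht0 : temp = [] := htemp1 (by omega)
          exact ih (pre ++ [c]) (d + 1) res (temp ++ [c]) (pre.length : Int) spans
            hpre' hres (by omega)
            (fun _ => ⟨pre.length, rfl, by simp, by simp [ht0]⟩)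
        · -- depth ≤ 0: ignored opening brace
          have hA : pvStepA (d, res, temp) c = (d + 1, res, temp) := by
            simp [pvStepA, hc1, show ¬((1:Int) ≤ d) by omega]
          have hB : pvStepB (d, start, spans) ((pre.length : Int), c)
              = (d + 1, start, spans) := by
            simp [pvStepB, hc1, show ¬(d + 1 = 2) by omega]
          rw [hA, hB, ← hlen']
          exact ih (pre ++ [c]) (d + 1) res temp start spans hpre' hres
            (fun _ => htemp1 (by omega)) (by omega)
    · by_cases hc2 : c = '}'
      · -- closing brace
        by_cases hd3 : 3 ≤ d
        · -- stays at depth ≥ 2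
          obtain ⟨s, hs, hslt, htemp⟩ := htemp2 (by omega)
          have hA : pvStepA (d, res, temp) c = (d - 1, res, temp ++ [c]) := by
            simp [pvStepA, hc2, show (1:Int) ≤ d - 1 by omega, show ¬(d - 1 = 1) by omega]
          have hB : pvStepB (d, start, spans) ((pre.length : Int), c)
              = (d - 1, start, spans) := by
            simp [pvStepB, hc2, show ¬(d - 1 = 1) by omega]
          rw [hA, hB, ← hlen']
          exact ih (pre ++ [c]) (d - 1) res (temp ++ [c]) start spans hpre' hres
            (by omega)
            (fun _ => ⟨s, hs, by simp [List.length_append]; omega,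
              by rw [htemp, List.drop_append_of_le_length (by omega)]⟩)
        · by_cases hd2 : d = 2
          · -- depth 2 → 1 transition: flush the block
            obtain ⟨s, hs, hslt, htemp⟩ := htemp2 (by omega)
            have hA : pvStepA (d, res, temp) c
                = (d - 1, res ++ [String.ofList (PySem.Chars.strip
                    (PySem.List.slice (temp ++ [c]) (some 1) (some (-1))))], []) := by
              simp [pvStepA, hc2, show (1:Int) ≤ d - 1 by omega, show d - 1 = 1 by omega]
            have hB : pvStepB (d, start, spans) ((pre.length : Int), c)
                = (d - 1, start, spans ++ [(start, (pre.length : Int))]) := by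
              simp [pvStepB, hc2, show d - 1 = 1 by omega]
            have hflush : String.ofList (PySem.Chars.strip
                (PySem.List.slice (temp ++ [c]) (some 1) (some (-1))))
                = pvSliceStrip cs (start, (pre.length : Int)) := by
              rw [slice_one_negone, htemp, List.drop_drop]
              unfold pvSliceStrip
              rw [hs, hcs, slice_of_prefix pre (c :: rest) s hslt]
            have hres' : res ++ [String.ofList (PySem.Chars.strip
                (PySem.List.slice (temp ++ [c]) (some 1) (some (-1))))]
                = (spans ++ [(start, (pre.length : Int))]).map (pvSliceStrip cs) := by
              rw [List.map_append, ← hres, hflush]; rfl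
            rw [hA, hB, ← hlen']
            exact ih (pre ++ [c]) (d - 1) _ [] start
              (spans ++ [(start, (pre.length : Int))]) hpre' hres'
              (fun _ => rfl) (by omega)
          · -- depth drops to ≤ 0
            have hA : pvStepA (d, res, temp) c = (d - 1, res, temp) := by
              simp [pvStepA, hc2, show ¬((1:Int) ≤ d - 1) by omega]
            have hB : pvStepB (d, start, spans) ((pre.length : Int), c)
                = (d - 1, start, spans) := by
              simp [pvStepB, hc2, show ¬(d - 1 = 1) by omega]
            rw [hA, hB, ← hlen']
            exact ih (pre ++ [c]) (d - 1) res temp start spans hpre' hres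
              (fun _ => htemp1 (by omega)) (by omega)
      · -- ordinary character
        by_cases hd2 : 2 ≤ d
        · obtain ⟨s, hs, hslt, htemp⟩ := htemp2 hd2
          have hA : pvStepA (d, res, temp) c = (d, res, temp ++ [c]) := by
            simp [pvStepA, hc1, hc2, hd2]
          have hB : pvStepB (d, start, spans) ((pre.length : Int), c)
              = (d, start, spans) := by
            simp [pvStepB, hc1, hc2]
          rw [hA, hB, ← hlen']
          exact ih (pre ++ [c]) d res (temp ++ [c]) start spans hpre' hres
            (by omega)
            (fun _ => ⟨s, hs, by simp [List.length_append]; omega,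
              by rw [htemp, List.drop_append_of_le_length (by omega)]⟩)
        · have hA : pvStepA (d, res, temp) c = (d, res, temp) := by
            simp [pvStepA, hc1, hc2, show ¬((2:Int) ≤ d) by omega]
          have hB : pvStepB (d, start, spans) ((pre.length : Int), c)
              = (d, start, spans) := by
            simp [pvStepB, hc1, hc2]
          rw [hA, hB, ← hlen']
          exact ih (pre ++ [c]) d res temp start spans hpre' hres htemp1 (by omega)

-- ===== VERDICT (by name: the statement is the Claim_ definition above) =====
theorem extract_braces_of_depth_2_or_more_without_outer_braces_spec : Claim_equal_extract_braces_of_depth_2_or_more_without_outer_braces := by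
  intro content _
  unfold Spec_extract_braces_of_depth_2_or_more_without_outer_braces
  unfold extract_braces_of_depth_2_or_more_without_outer_braces
  unfold extract_braces_of_depth_2_or_more_without_outer_braces_alt
  have := loop_eq content.toList content.toList [] 0 [] [] (-1) []
    (by simp) rfl (fun _ => rfl) (by omega)
  simpa using this
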